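-- pv_equiv track=rewrite | github.com/pranitashedage1/Coding-Practice | Examples/Find Recurring Names.py | findRecurringNames
-- ===== SOURCE A (Python) =====
-- from collections import defaultdict
--
-- def findRecurringNames(realNames, allNames):
--     result = []
--     freq = defaultdict(int)
--     for i in allNames:
--         freq[''.join(sorted(i))] += 1
--
--     for j in realNames:
--         if freq[''.join(sorted(j))] > 1:
--             result.append(j)
--
--     result.sort()
--     return result
-- ===== SOURCE B (Python) =====
-- def findRecurringNames(realNames, allNames):
--     # sort the anagram signatures, then one adjacent-duplicate scan finds the recurring ones
--     sigs = sorted(''.join(sorted(name)) for name in allNames)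
--     recurring = set()
--     for prev, cur in zip(sigs, sigs[1:]):
--         if cur == prev:
--             recurring.add(cur)
--     return sorted(j for j in realNames if ''.join(sorted(j)) in recurring)
-- ===== Notes on version B (the rewrite author's own statement) =====
-- stated objective: alternative
-- what changed: Replaces the frequency defaultdict with a sort of all signatures followed by a single adjacent-duplicate scan that collects recurring signatures into a set, then one filter over realNames.
import Mathlib
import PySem

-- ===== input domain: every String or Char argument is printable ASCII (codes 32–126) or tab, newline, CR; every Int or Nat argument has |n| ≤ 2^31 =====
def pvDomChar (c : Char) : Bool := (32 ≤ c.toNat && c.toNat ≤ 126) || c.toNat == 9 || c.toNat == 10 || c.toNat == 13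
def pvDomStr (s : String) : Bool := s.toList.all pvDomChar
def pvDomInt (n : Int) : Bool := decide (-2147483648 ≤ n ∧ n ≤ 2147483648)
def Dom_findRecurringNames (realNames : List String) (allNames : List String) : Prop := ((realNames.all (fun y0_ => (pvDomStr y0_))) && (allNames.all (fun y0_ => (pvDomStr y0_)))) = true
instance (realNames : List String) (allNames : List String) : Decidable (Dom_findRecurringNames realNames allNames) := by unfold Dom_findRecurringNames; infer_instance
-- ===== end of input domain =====

-- B replaces A's frequency dict with sort-then-adjacent-duplicate-scan over the signatures; same results, different algorithm (objective: alternative).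

-- ===== PORT A =====
-- ''.join(sorted(s)) — the anagram signature (used by both Pythons)
def pvSig (s : String) : String := String.ofList (PySem.List.sorted s.toList (fun c => c) false)

def findRecurringNames (realNames : List String) (allNames : List String) : List String :=
  let freq : PySem.Dict String Int :=
    allNames.foldl (fun d i => d.modify (pvSig i) 0 (fun v => v + 1)) PySem.Dict.empty
  let result : List String :=
    realNames.foldl (fun r j => if freq.getD (pvSig j) 0 > 1 then r ++ [j] else r) []
  PySem.List.sorted result (fun x => x) false

-- ===== PORT B =====
def findRecurringNames_alt (realNames : List String) (allNames : List String) : List String :=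
  let sigs : List String := PySem.List.sorted (allNames.map pvSig) (fun x => x) false
  let recurring : PySem.Set String :=
    (sigs.zip (PySem.List.slice sigs (some 1) none)).foldl
      (fun acc pc => if pc.2 == pc.1 then PySem.Set.add acc pc.2 else acc) PySem.Set.empty
  PySem.List.sorted (realNames.filter (fun j => PySem.Set.contains recurring (pvSig j))) (fun x => x) false

-- ===== PRECONDITION & SPEC =====
def Spec_findRecurringNames (realNames : List String) (allNames : List String) (out : List String) : Prop := out = findRecurringNames_alt realNames allNames
instance (realNames : List String) (allNames : List String) (out : List String) : Decidable (Spec_findRecurringNames realNames allNames out) := by unfold Spec_findRecurringNames; infer_instance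

-- ===== CLAIM (what is proved, stated in full; the proofs are below) =====
def Claim_equal_findRecurringNames : Prop := ∀ (realNames : List String) (allNames : List String), Dom_findRecurringNames realNames allNames → Spec_findRecurringNames realNames allNames (findRecurringNames realNames allNames)

-- ===== LEMMAS AND PROOFS =====

-- the adjacent-duplicate scan of a ≤-sorted list collects exactly the elements of count ≥ 2
theorem pv_scan_mem (l : List String) (hl : l.Pairwise (· ≤ ·)) (acc : PySem.Set String) (x : String) :
    x ∈ (l.zip (l.drop 1)).foldl
      (fun acc pc => if pc.2 == pc.1 then PySem.Set.add acc pc.2 else acc) acc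
    ↔ x ∈ acc ∨ 2 ≤ l.count x := by
  induction l generalizing acc with
  | nil => simp
  | cons a t ih =>
    cases t with
    | nil =>
      simp only [List.drop, List.zip_nil_right, List.foldl_nil]
      have := List.count_le_length (l := [a]) (a := x)
      constructor
      · exact Or.inl
      · rintro (h | h)
        · exact h
        · exfalso; simp at this; omega
    | cons b u =>
      have hab : a ≤ b := (List.pairwise_cons.mp hl).1 b (by simp)
      have hl' : (b :: u).Pairwise (· ≤ ·) := (List.pairwise_cons.mp hl).2
      have hz : ((a :: b :: u).zip ((a :: b :: u).drop 1))
          = (a, b) :: ((b :: u).zip ((b :: u).drop 1)) := by simp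
      rw [hz, List.foldl_cons, ih hl']
      by_cases hba : b = a
      · subst hba
        simp only [beq_self_eq_true, if_pos]
        rw [PySem.Set.mem_add]
        by_cases hxb : x = b
        · subst hxb
          have h2 : 2 ≤ List.count x (x :: x :: u) := by simp
          constructor
          · intro _; exact Or.inr h2
          · intro _; exact Or.inl (Or.inr rfl)
        · have hc : List.count x (b :: b :: u) = List.count x (b :: u) := by
            simp [Ne.symm hxb]
          rw [hc]
          simp [hxb]
      · have hne : (b == a) = false := by simp [hba]
        simp only [hne, Bool.false_eq_true, if_neg, not_false_iff]
        by_cases hxa : x = a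
        · subst hxa
          have hnot : x ∉ b :: u := by
            intro hmem
            have hle : b ≤ x := by
              rcases List.mem_cons.mp hmem with h | h
              · exact le_of_eq h.symm
              · exact (List.pairwise_cons.mp hl').1 x h
            exact hba (le_antisymm hle hab)
          have h0 : List.count x (b :: u) = 0 := List.count_eq_zero.mpr hnot
          have h1 : List.count x (x :: b :: u) = 1 := by
            simp [h0]
          simp [h0, h1]
        · have hc : List.count x (a :: b :: u) = List.count x (b :: u) := by
            simp [Ne.symm hxa]
          rw [hc]

-- A's freq lookup is the count of the signature among all signatures
theorem pv_freq_getD (allNames : List String) (v : String) :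
    (allNames.foldl (fun d i => d.modify (pvSig i) 0 (fun v => v + 1))
        (PySem.Dict.empty : PySem.Dict String Int)).getD v 0
      = ((allNames.map pvSig).count v : Int) := by
  rw [← List.foldl_map (f := pvSig)
      (g := fun (d : PySem.Dict String Int) x => d.modify x 0 (fun v => v + 1))]
  rw [PySem.Dict.getD_foldl_modify_add_one]
  simp

-- ===== VERDICT (by name: the statement is the Claim_ definition above) =====
theorem findRecurringNames_spec : Claim_equal_findRecurringNames := by
  intro realNames allNames _
  show _ = _
  unfold findRecurringNames findRecurringNames_alt
  simp only []
  rw [PySem.List.foldl_append_ite_eq_filter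
      (p := fun j => (allNames.foldl (fun d i => d.modify (pvSig i) 0 (fun v => v + 1))
        (PySem.Dict.empty : PySem.Dict String Int)).getD (pvSig j) 0 > 1)]
  rw [List.nil_append]
  congr 1
  apply List.filter_congr
  intro j _
  set sigs := PySem.List.sorted (allNames.map pvSig) (fun x => x) false with hsigs
  have hslice : PySem.List.slice sigs (some 1) none = sigs.drop 1 := by
    simp [PySem.List.slice_from]
  have hsorted : sigs.Pairwise (· ≤ ·) := PySem.List.sorted_pairwise _ _
  have hperm : sigs.Perm (allNames.map pvSig) := PySem.List.sorted_perm _ _ _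
  have hcount : sigs.count (pvSig j) = (allNames.map pvSig).count (pvSig j) :=
    hperm.count_eq _
  rw [hslice]
  rw [pv_freq_getD allNames (pvSig j)]
  have hmem := pv_scan_mem sigs hsorted PySem.Set.empty (pvSig j)
  simp only [PySem.Set.empty] at hmem
  have hcontains : PySem.Set.contains
      ((sigs.zip (sigs.drop 1)).foldl
        (fun acc pc => if pc.2 == pc.1 then PySem.Set.add acc pc.2 else acc) [])
      (pvSig j) = true
      ↔ 2 ≤ (allNames.map pvSig).count (pvSig j) := by
    rw [show (PySem.Set.contains = fun (s : PySem.Set String) x => List.contains s x) from rfl]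
    rw [List.contains_iff_mem, hmem]
    simp [hcount]
  rw [Bool.eq_iff_iff]
  simp only [decide_eq_true_eq, gt_iff_lt]
  rw [show PySem.Set.empty = ([] : List String) from rfl]
  rw [hcontains]
  omega
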